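-- pv_equiv track=rewrite | github.com/mmerickel/advent-of-code-2019 | p1_2.py | calc_total_fuel_cost
-- ===== SOURCE A (Python) =====
-- calc_fuel_cost = lambda mass: mass // 3 - 2
--
-- def calc_total_fuel_cost(mass):
--     total_cost = 0
--     while True:
--         cost = calc_fuel_cost(mass)
--         if cost <= 0:
--             break
--
--         total_cost += cost
--         mass = cost
--     return total_cost
-- ===== SOURCE B (Python) =====
-- def calc_total_fuel_cost(mass):
--     cost = mass // 3 - 2
--     if cost <= 0:
--         return 0
--     return cost + calc_total_fuel_cost(cost)
-- ===== Notes on version B (the rewrite author's own statement) =====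
-- stated objective: simpler
-- what changed: Replaced the accumulator-threading while-loop with direct recursion over the fuel chain that sums on the way back up (no mutable total).
import Mathlib
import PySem

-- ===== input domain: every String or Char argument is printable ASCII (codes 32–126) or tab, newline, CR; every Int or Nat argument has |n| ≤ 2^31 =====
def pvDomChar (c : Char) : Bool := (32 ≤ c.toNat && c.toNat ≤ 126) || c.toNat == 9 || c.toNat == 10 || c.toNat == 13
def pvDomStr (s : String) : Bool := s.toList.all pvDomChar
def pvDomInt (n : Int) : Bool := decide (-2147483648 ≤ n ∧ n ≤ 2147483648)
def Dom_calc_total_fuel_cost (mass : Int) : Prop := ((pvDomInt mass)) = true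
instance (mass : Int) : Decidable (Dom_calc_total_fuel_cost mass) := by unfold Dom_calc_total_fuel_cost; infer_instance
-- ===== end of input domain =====

-- B replaces A's accumulator-threading while-loop by direct recursion that sums on the way back up (simpler decomposition; same values).


-- termination fact both ports cite: a positive fuel cost is strictly smaller than the mass
theorem pv_cost_lt (mass : Int) (h : ¬ PySem.Int.floordiv mass 3 - 2 ≤ 0) :
    (PySem.Int.floordiv mass 3 - 2).toNat < mass.toNat := by
  rw [PySem.Int.floordiv_eq_ediv_of_pos (by omega)] at *
  omega

-- ===== PORT A =====
-- calc_fuel_cost = lambda mass: mass // 3 - 2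
def calc_fuel_cost (mass : Int) : Int := PySem.Int.floordiv mass 3 - 2

-- A's while-loop, with the mutable state (mass, total_cost) threaded through a tail-recursive loop
def calc_total_fuel_cost_loop (mass total_cost : Int) : Int :=
  let cost := calc_fuel_cost mass
  if h : cost ≤ 0 then total_cost
  else calc_total_fuel_cost_loop cost (total_cost + cost)
termination_by mass.toNat
decreasing_by exact pv_cost_lt mass h

def calc_total_fuel_cost (mass : Int) : Int := calc_total_fuel_cost_loop mass 0

-- ===== PORT B =====
-- direct recursion: cost + recursive total of cost, 0 at the base
def calc_total_fuel_cost_alt (mass : Int) : Int :=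
  let cost := PySem.Int.floordiv mass 3 - 2
  if h : cost ≤ 0 then 0
  else cost + calc_total_fuel_cost_alt cost
termination_by mass.toNat
decreasing_by exact pv_cost_lt mass h

-- ===== PRECONDITION & SPEC =====
def Spec_calc_total_fuel_cost (mass : Int) (out : Int) : Prop := out = calc_total_fuel_cost_alt mass
instance (mass : Int) (out : Int) : Decidable (Spec_calc_total_fuel_cost mass out) := by unfold Spec_calc_total_fuel_cost; infer_instance

-- ===== CLAIM (what is proved, stated in full; the proofs are below) =====
def Claim_equal_calc_total_fuel_cost : Prop := ∀ (mass : Int), Dom_calc_total_fuel_cost mass → Spec_calc_total_fuel_cost mass (calc_total_fuel_cost mass)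

-- ===== LEMMAS AND PROOFS =====
-- loop invariant: A's loop returns the accumulator plus B's back-up sum
theorem pv_loop_eq (mass total_cost : Int) :
    calc_total_fuel_cost_loop mass total_cost = total_cost + calc_total_fuel_cost_alt mass := by
  rw [calc_total_fuel_cost_loop, calc_total_fuel_cost_alt]
  simp only [calc_fuel_cost]
  by_cases h : PySem.Int.floordiv mass 3 - 2 ≤ 0
  all_goals rw [PySem.Int.floordiv_eq_ediv_of_pos (show (0:Int) < 3 by omega)] at h
  · simp [show mass / 3 ≤ 2 by omega]
  · rw [pv_loop_eq]
    simp only [PySem.Int.floordiv_eq_ediv_of_pos (show (0:Int) < 3 by omega)]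
    split_ifs <;> omega
termination_by mass.toNat
decreasing_by exact pv_cost_lt mass (by omega)

-- ===== VERDICT (by name: the statement is the Claim_ definition above) =====
theorem calc_total_fuel_cost_spec : Claim_equal_calc_total_fuel_cost := by
  intro mass _
  unfold Spec_calc_total_fuel_cost calc_total_fuel_cost
  rw [pv_loop_eq]
  ring
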